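-- pv_equiv track=rewrite | github.com/posl/comment_recommendation | script/mod_gen/2_time/zh/145_D/1.py | solve
-- ===== SOURCE A (Python) =====
-- def solve(x, y):
--     if x + y == 0:
--         return 1
--     elif x + y == 1:
--         return 0
--     else:
--         # 骑士可以从(i,j)到达(i+1,j+2)或(i+2,j+1)。
--         # 从(i+1,j+2)到达(X,Y)的方法数为solve(X-i-1,Y-j-2)。
--         # 从(i+2,j+1)到达(X,Y)的方法数为solve(X-i-2,Y-j-1)。
--         # 因此，从(i,j)到达(X,Y)的方法数为solve(X-i-1,Y-j-2)+solve(X-i-2,Y-j-1)。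
--         # 为了避免重复计算，我们使用记忆化递归。
--         if (x, y) in memo:
--             return memo[(x, y)]
--         else:
--             memo[(x, y)] = (solve(x - 1, y - 2) + solve(x - 2, y - 1)) % 1000000007
--             return memo[(x, y)]
--
-- memo = {}
-- ===== SOURCE B (Python) =====
-- def solve(x, y):
--     s = x + y
--     if s < 0 or s % 3 != 0:
--         return 0
--     return pow(2, s // 3, 1000000007)
-- ===== Notes on version B (the rewrite author's own statement) =====
-- stated objective: faster
-- what changed: Replaces the memoized pairwise recursion with the closed form 2^((x+y)/3) mod 1000000007 (each step lowers x+y by 3 and offers 2 choices), computed by built-in modular exponentiation.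
import Mathlib
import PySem

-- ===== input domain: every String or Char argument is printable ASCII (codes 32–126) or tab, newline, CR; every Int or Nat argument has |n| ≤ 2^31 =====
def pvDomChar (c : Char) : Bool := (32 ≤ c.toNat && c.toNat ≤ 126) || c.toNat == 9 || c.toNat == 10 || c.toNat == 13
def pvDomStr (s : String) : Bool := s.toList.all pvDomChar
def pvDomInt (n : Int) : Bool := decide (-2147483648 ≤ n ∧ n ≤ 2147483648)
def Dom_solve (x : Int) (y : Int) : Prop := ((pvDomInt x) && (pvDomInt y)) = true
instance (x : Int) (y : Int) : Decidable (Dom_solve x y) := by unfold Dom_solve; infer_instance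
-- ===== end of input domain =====

-- B replaces A's memoized two-branch recursion by the closed form 2^((x+y)/3) mod 1000000007
-- (objective: faster — modular exponentiation instead of a recursion that fills a memo table).
-- A's global memo dict caches only pure values, so starting each call from an empty memo
-- returns the same value as the shared global dict.

-- ===== PORT A =====
-- the memo dict is threaded through the recursion; fuel makes it total
-- (Pre_solve guarantees the fuel is never exhausted)
def solveF : Nat → PySem.Dict (Int × Int) Int → Int → Int → Int × PySem.Dict (Int × Int) Int
  | 0, memo, _, _ => (0, memo)
  | f + 1, memo, x, y =>
    if x + y = 0 then (1, memo)
    else if x + y = 1 then (0, memo)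
    else
      match memo.get? (x, y) with
      | some v => (v, memo)
      | none =>
        let r1 := solveF f memo (x - 1) (y - 2)
        let r2 := solveF f r1.2 (x - 2) (y - 1)
        let v := PySem.Int.mod (r1.1 + r2.1) 1000000007
        (v, r2.2.insert (x, y) v)

def solve (x : Int) (y : Int) : Int := (solveF ((x + y).toNat + 1) ⟨[]⟩ x y).1

-- ===== PORT B =====
def solve_alt (x : Int) (y : Int) : Int :=
  let s := x + y
  if s < 0 ∨ PySem.Int.mod s 3 ≠ 0 then 0
  else PySem.Int.powMod 2 (PySem.Int.floordiv s 3).toNat 1000000007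

-- ===== PRECONDITION & SPEC =====
-- Pre_ excludes exactly the inputs where A's recursion never reaches a base case
-- (x+y negative, or x+y ≡ 2 mod 3) and so raises RecursionError; B returns 0 there.
def Pre_solve (x : Int) (y : Int) : Prop := 0 ≤ x + y ∧ (x + y) % 3 ≠ 2
instance (x : Int) (y : Int) : Decidable (Pre_solve x y) := by unfold Pre_solve; infer_instance
def pvWitness_solve : Int × Int := (4, 2)

def Spec_solve (x : Int) (y : Int) (out : Int) : Prop := out = solve_alt x y
instance (x : Int) (y : Int) (out : Int) : Decidable (Spec_solve x y out) := by unfold Spec_solve; infer_instance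

-- ===== CLAIM (what is proved, stated in full; the proofs are below) =====
def Claim_equal_solve : Prop := ∀ (x : Int) (y : Int), Dom_solve x y → Pre_solve x y → Spec_solve x y (solve x y)

-- ===== LEMMAS AND PROOFS =====

theorem pymod_pos (a b : Int) (hb : 0 ≤ b) : PySem.Int.mod a b = a % b := by
  simp [PySem.Int.mod, Int.fmod_eq_emod, hb]

theorem pyfdiv_pos (a b : Int) (hb : 0 ≤ b) : PySem.Int.floordiv a b = a / b := by
  simp [PySem.Int.floordiv, Int.fdiv_eq_ediv, hb]

-- the closed form A's recursion computes
def closedForm (x : Int) (y : Int) : Int :=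
  if (x + y) % 3 = 0 then (2 ^ ((x + y) / 3).toNat) % 1000000007 else 0

-- a memo is good when every cached value is the closed form of its key
def GoodMemo (m : PySem.Dict (Int × Int) Int) : Prop :=
  ∀ k v, m.get? k = some v → v = closedForm k.1 k.2

-- the recursive step of A preserves the closed form
theorem closedForm_step (x y : Int) (h2 : 2 ≤ x + y) (hnn : 0 ≤ x - 1 + (y - 2))
    (hm : (x + y) % 3 ≠ 2) :
    PySem.Int.mod (closedForm (x - 1) (y - 2) + closedForm (x - 2) (y - 1)) 1000000007
      = closedForm x y := by
  have hxy : x - 2 + (y - 1) = x - 1 + (y - 2) := by ring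
  rw [pymod_pos _ _ (by norm_num)]
  unfold closedForm
  rw [hxy]
  by_cases hz : (x + y) % 3 = 0
  · have hz' : (x - 1 + (y - 2)) % 3 = 0 := by omega
    obtain ⟨n, hn1, hn2⟩ : ∃ n : Nat, ((x - 1 + (y - 2)) / 3).toNat = n ∧ ((x + y) / 3).toNat = n + 1 := by
      refine ⟨((x - 1 + (y - 2)) / 3).toNat, rfl, ?_⟩; omega
    simp only [hz, hz', hn1, hn2, if_pos]
    rw [← Int.add_emod]
    congr 1
    rw [pow_succ]
    ring
  · have hz' : (x - 1 + (y - 2)) % 3 ≠ 0 := by omega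
    simp [hz, hz']

-- main invariant: on admitted inputs, with enough fuel and a good memo,
-- A's recursion returns the closed form and keeps the memo good
theorem solveF_eq (f : Nat) : ∀ (m : PySem.Dict (Int × Int) Int) (x y : Int),
    GoodMemo m → (x + y).toNat < f → 0 ≤ x + y → (x + y) % 3 ≠ 2 →
    (solveF f m x y).1 = closedForm x y ∧ GoodMemo (solveF f m x y).2 := by
  induction f with
  | zero => intro m x y _ hf _ _; omega
  | succ f ih =>
    intro m x y hg hf hnn hm
    by_cases h0 : x + y = 0
    · constructor
      · simp [solveF, h0, closedForm]
      · simpa [solveF, h0] using hg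
    · by_cases h1 : x + y = 1
      · constructor
        · have : (x + y) % 3 = 1 := by omega
          simp [solveF, h0, h1, closedForm, this]
        · simpa [solveF, h0, h1] using hg
      · have h2 : 2 ≤ x + y := by omega
        have hge3 : 3 ≤ x + y := by omega
        simp only [solveF, if_neg h0, if_neg h1]
        cases hmemo : m.get? (x, y) with
        | some v =>
          exact ⟨hg (x, y) v hmemo, hg⟩
        | none =>
          have hnn' : 0 ≤ x - 1 + (y - 2) := by omega
          obtain ⟨e1, g1⟩ := ih m (x - 1) (y - 2) hg (by omega) hnn' (by omega)
          obtain ⟨e2, g2⟩ := ih (solveF f m (x - 1) (y - 2)).2 (x - 2) (y - 1) g1 (by omega) (by omega) (by omega)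
          have hv : PySem.Int.mod ((solveF f m (x - 1) (y - 2)).1 + (solveF f (solveF f m (x - 1) (y - 2)).2 (x - 2) (y - 1)).1) 1000000007 = closedForm x y := by
            rw [e1, e2]
            exact closedForm_step x y h2 hnn' hm
          refine ⟨hv, ?_⟩
          intro k w hk
          rw [PySem.Dict.get?_insert] at hk
          by_cases hkx : k = (x, y)
          · rw [if_pos hkx] at hk
            cases hk
            rw [hv, hkx]
          · rw [if_neg hkx] at hk
            exact g2 k w hk

theorem solve_closed (x y : Int) (hnn : 0 ≤ x + y) (hm : (x + y) % 3 ≠ 2) :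
    solve x y = closedForm x y := by
  unfold solve
  exact (solveF_eq ((x + y).toNat + 1) ⟨[]⟩ x y (by intro k v h; simp [PySem.Dict.get?] at h)
    (by omega) hnn hm).1

-- ===== VERDICT (by name: the statement is the Claim_ definition above) =====
theorem solve_spec : Claim_equal_solve := by
  unfold Claim_equal_solve
  intro x y _ hpre
  obtain ⟨hnn, hm⟩ := hpre
  unfold Spec_solve solve_alt
  rw [solve_closed x y hnn hm]
  show _ = if x + y < 0 ∨ PySem.Int.mod (x + y) 3 ≠ 0 then 0 else PySem.Int.powMod 2 (PySem.Int.floordiv (x + y) 3).toNat 1000000007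
  rw [pymod_pos _ _ (by norm_num), pyfdiv_pos _ _ (by norm_num)]
  unfold closedForm
  by_cases hz : (x + y) % 3 = 0
  · rw [if_pos hz, if_neg (by omega : ¬(x + y < 0 ∨ (x + y) % 3 ≠ 0))]
    unfold PySem.Int.powMod
    rw [pymod_pos _ _ (by norm_num)]
  · rw [if_neg hz, if_pos (by omega)]
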